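-- pv_equiv track=rewrite | github.com/tenstorrent/tt-metal | tests/sweep_framework/sweeps/ccl/all_gather_t3k_height_sharded.py | generate_shard_input_shapes
-- ===== SOURCE A (Python) =====
-- def generate_shard_input_shapes(batch_sizes, shard_Y, shard_X, x=1, y=1):
--     input_shapes = []
--     for W in batch_sizes:
--         for Z in batch_sizes:
--             for height in shard_Y:
--                 for width in shard_X:
--                     input_shapes.append([W, Z, height * x, width * y])
--     input_shapes = input_shapes[:50] + input_shapes[-50:]
--     return input_shapes
-- ===== SOURCE B (Python) =====
-- def generate_shard_input_shapes(batch_sizes, shard_Y, shard_X, x=1, y=1):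
--     b, sy, sx = len(batch_sizes), len(shard_Y), len(shard_X)
--     n = b * b * sy * sx
--
--     def shape(i):
--         q1, xi = divmod(i, sx)
--         q2, hi = divmod(q1, sy)
--         wi, zi = divmod(q2, b)
--         return [batch_sizes[wi], batch_sizes[zi], shard_Y[hi] * x, shard_X[xi] * y]
--
--     idxs = list(range(min(50, n))) + list(range(max(n - 50, 0), n))
--     return [shape(i) for i in idxs]
-- ===== Notes on version B (the rewrite author's own statement) =====
-- stated objective: faster
-- what changed: B never materializes the full cartesian product: it computes only the <=100 needed positions (first/last 50) by divmod index decomposition into the four coordinates.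
import Mathlib
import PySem

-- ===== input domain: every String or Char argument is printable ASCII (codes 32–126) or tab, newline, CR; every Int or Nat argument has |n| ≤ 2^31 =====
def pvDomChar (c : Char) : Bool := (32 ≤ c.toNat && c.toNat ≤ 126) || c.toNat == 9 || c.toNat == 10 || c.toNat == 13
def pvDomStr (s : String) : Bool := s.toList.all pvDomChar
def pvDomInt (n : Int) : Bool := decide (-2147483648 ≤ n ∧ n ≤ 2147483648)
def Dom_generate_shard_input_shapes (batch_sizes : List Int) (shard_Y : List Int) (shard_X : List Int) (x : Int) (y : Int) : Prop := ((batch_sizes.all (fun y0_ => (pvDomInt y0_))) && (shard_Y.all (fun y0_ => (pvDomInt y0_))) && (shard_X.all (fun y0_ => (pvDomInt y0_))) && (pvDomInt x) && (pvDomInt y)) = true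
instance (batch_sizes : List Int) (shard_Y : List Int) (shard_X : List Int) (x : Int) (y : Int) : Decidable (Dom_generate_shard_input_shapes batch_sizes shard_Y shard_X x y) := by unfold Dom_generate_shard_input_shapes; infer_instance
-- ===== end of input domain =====

-- B replaces materializing the whole |batch|²·|Y|·|X| cartesian product with index
-- decomposition of only the ≤100 needed positions (first/last 50): O(1) output work.

-- ===== PORT A =====
-- literal transliteration of A's four nested loops appending to input_shapes,
-- then input_shapes[:50] + input_shapes[-50:]
def generate_shard_input_shapes (batch_sizes : List Int) (shard_Y : List Int) (shard_X : List Int) (x : Int) (y : Int) : List (List Int) :=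
  let input_shapes : List (List Int) :=
    batch_sizes.foldl (fun acc W =>
      batch_sizes.foldl (fun acc Z =>
        shard_Y.foldl (fun acc height =>
          shard_X.foldl (fun acc width =>
            acc ++ [[W, Z, height * x, width * y]]) acc) acc) acc) []
  PySem.List.slice input_shapes none (some 50) ++ PySem.List.slice input_shapes (some (-50)) none

-- ===== PORT B =====
-- Source B's shape(i): decompose a flat product index i by divmod into the four coordinates
def pvShapeAt (batch_sizes : List Int) (shard_Y : List Int) (shard_X : List Int) (x : Int) (y : Int) (i : Nat) : List Int :=
  let q1 := i / shard_X.length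
  let xi := i % shard_X.length
  let q2 := q1 / shard_Y.length
  let hi := q1 % shard_Y.length
  let wi := q2 / batch_sizes.length
  let zi := q2 % batch_sizes.length
  [batch_sizes.getD wi 0, batch_sizes.getD zi 0, shard_Y.getD hi 0 * x, shard_X.getD xi 0 * y]

-- Source B: idxs = range(min(50,n)) + range(max(n-50,0), n); return [shape(i) for i in idxs]
def generate_shard_input_shapes_alt (batch_sizes : List Int) (shard_Y : List Int) (shard_X : List Int) (x : Int) (y : Int) : List (List Int) :=
  let n := batch_sizes.length * batch_sizes.length * shard_Y.length * shard_X.length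
  (List.range (min 50 n) ++ List.range' (n - 50) (n - (n - 50))).map
    (pvShapeAt batch_sizes shard_Y shard_X x y)

-- ===== PRECONDITION & SPEC =====
def Spec_generate_shard_input_shapes (batch_sizes : List Int) (shard_Y : List Int) (shard_X : List Int) (x : Int) (y : Int) (out : List (List Int)) : Prop := out = generate_shard_input_shapes_alt batch_sizes shard_Y shard_X x y
instance (batch_sizes : List Int) (shard_Y : List Int) (shard_X : List Int) (x : Int) (y : Int) (out : List (List Int)) : Decidable (Spec_generate_shard_input_shapes batch_sizes shard_Y shard_X x y out) := by unfold Spec_generate_shard_input_shapes; infer_instance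

-- ===== CLAIM (what is proved, stated in full; the proofs are below) =====
def Claim_equal_generate_shard_input_shapes : Prop := ∀ (batch_sizes : List Int) (shard_Y : List Int) (shard_X : List Int) (x : Int) (y : Int), Dom_generate_shard_input_shapes batch_sizes shard_Y shard_X x y → Spec_generate_shard_input_shapes batch_sizes shard_Y shard_X x y (generate_shard_input_shapes batch_sizes shard_Y shard_X x y)

-- ===== LEMMAS AND PROOFS =====

-- the full cartesian product, as a flatMap nest (proof device)
def pvL (bs sY sX : List Int) (x y : Int) : List (List Int) :=
  bs.flatMap (fun W => bs.flatMap (fun Z => sY.flatMap (fun h => sX.map (fun w => [W, Z, h * x, w * y]))))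

lemma pvLenY (sY sX : List Int) (f : Int → Int → List Int) :
    (sY.flatMap (fun h => sX.map (f h))).length = sX.length * sY.length := by
  simp [List.length_flatMap, Nat.mul_comm]

lemma pvLenZ (bs sY sX : List Int) (g : Int → Int → Int → List Int) :
    (bs.flatMap (fun Z => sY.flatMap (fun h => sX.map (g Z h)))).length
      = sX.length * sY.length * bs.length := by
  simp [List.length_flatMap, Nat.mul_comm]

lemma pvLen_pvL (bs sY sX : List Int) (x y : Int) :
    (pvL bs sY sX x y).length = bs.length * bs.length * sY.length * sX.length := by
  unfold pvL
  simp [List.length_flatMap, Nat.mul_assoc]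

-- getElem? of a flatMap whose blocks all have the same length m
lemma pvGetFlatMap {α β : Type} (l : List α) (f : α → List β) (m : Nat)
    (hm : ∀ a ∈ l, (f a).length = m) (i : Nat) :
    (l.flatMap f)[i]? = (l[i / m]?.bind fun a => (f a)[i % m]?) := by
  induction l generalizing i with
  | nil => simp
  | cons a t ih =>
    have ha : (f a).length = m := hm a (List.mem_cons_self)
    rw [List.flatMap_cons]
    by_cases hlt : i < m
    · have h0 : i / m = 0 := Nat.div_eq_of_lt hlt
      have hmod : i % m = i := Nat.mod_eq_of_lt hlt
      rw [List.getElem?_append_left (by omega), h0, hmod]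
      simp
    · rcases Nat.exists_eq_add_of_le (Nat.le_of_not_lt hlt) with ⟨j, rfl⟩
      by_cases hm0 : m = 0
      · subst hm0
        have hfa : f a = [] := List.eq_nil_of_length_eq_zero ha
        rw [List.getElem?_append_right (by omega), ih (fun b hb => hm b (List.mem_cons_of_mem a hb))]
        simp only [Nat.div_zero, Nat.mod_zero, List.getElem?_cons_zero,
          Option.bind_some, hfa, List.getElem?_nil]
        cases ht : t[0]? with
        | none => simp
        | some b =>
          have hb : f b = [] :=
            List.eq_nil_of_length_eq_zero (hm b (List.mem_cons_of_mem a (List.mem_of_getElem? ht)))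
          simp [hb]
      · rw [List.getElem?_append_right (by omega), ha,
          ih (fun b hb => hm b (List.mem_cons_of_mem a hb))]
        have h1 : (m + j) / m = j / m + 1 := by
          rw [Nat.add_comm m j, Nat.add_div_right _ (Nat.pos_of_ne_zero hm0)]
        have h2 : (m + j) % m = j % m := by
          rw [Nat.add_comm m j, Nat.add_mod_right]
        have h3 : m + j - m = j := by omega
        rw [h1, h2, h3]
        simp

lemma pvL_get (bs sY sX : List Int) (x y : Int) (i : Nat) :
    (pvL bs sY sX x y)[i]?
      = (bs[i / (sX.length * sY.length * bs.length)]?.bind fun W =>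
          bs[i / (sX.length * sY.length) % bs.length]?.bind fun Z =>
            sY[i / sX.length % sY.length]?.bind fun h =>
              (sX[i % sX.length]?.map fun w => [W, Z, h * x, w * y])) := by
  unfold pvL
  rw [pvGetFlatMap _ _ (sX.length * sY.length * bs.length)
      (fun W _ => pvLenZ bs sY sX (fun Z h w => [W, Z, h * x, w * y])) i]
  apply Option.bind_congr
  intro W _
  rw [pvGetFlatMap _ _ (sX.length * sY.length)
      (fun Z _ => pvLenY sY sX (fun h w => [W, Z, h * x, w * y]))]
  rw [Nat.mod_mul_right_div_self, Nat.mod_mod_of_dvd _ (dvd_mul_right (sX.length * sY.length) bs.length)]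
  apply Option.bind_congr
  intro Z _
  rw [pvGetFlatMap _ _ sX.length (fun h _ => by simp)]
  rw [Nat.mod_mul_right_div_self, Nat.mod_mod_of_dvd _ (dvd_mul_right sX.length sY.length)]
  apply Option.bind_congr
  intro h _
  simp

lemma pvShape_get (bs sY sX : List Int) (x y : Int) (i : Nat)
    (hi : i < bs.length * bs.length * sY.length * sX.length) :
    (pvL bs sY sX x y)[i]? = some (pvShapeAt bs sY sX x y i) := by
  have hb : 0 < bs.length := by
    rcases Nat.eq_zero_or_pos bs.length with h | h
    · simp [h] at hi
    · exact h
  have hsy : 0 < sY.length := by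
    rcases Nat.eq_zero_or_pos sY.length with h | h
    · simp [h] at hi
    · exact h
  have hsx : 0 < sX.length := by
    rcases Nat.eq_zero_or_pos sX.length with h | h
    · simp [h] at hi
    · exact h
  have hwi : i / (sX.length * sY.length * bs.length) < bs.length := by
    rw [Nat.div_lt_iff_lt_mul (by positivity)]
    calc i < bs.length * bs.length * sY.length * sX.length := hi
    _ = bs.length * (sX.length * sY.length * bs.length) := by ring
  have hzi : i / (sX.length * sY.length) % bs.length < bs.length := Nat.mod_lt _ hb
  have hhi : i / sX.length % sY.length < sY.length := Nat.mod_lt _ hsy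
  have hxi : i % sX.length < sX.length := Nat.mod_lt _ hsx
  rw [pvL_get, List.getElem?_eq_getElem hwi, List.getElem?_eq_getElem hzi,
      List.getElem?_eq_getElem hhi, List.getElem?_eq_getElem hxi]
  simp only [Option.bind_some, Option.map_some]
  unfold pvShapeAt
  have e2 : i / sX.length / sY.length = i / (sX.length * sY.length) := Nat.div_div_eq_div_mul _ _ _
  have e3 : i / (sX.length * sY.length) / bs.length = i / (sX.length * sY.length * bs.length) :=
    Nat.div_div_eq_div_mul _ _ _
  simp only [e2, e3]
  rw [List.getD_eq_getElem _ _ hwi, List.getD_eq_getElem _ _ hzi,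
      List.getD_eq_getElem _ _ hhi, List.getD_eq_getElem _ _ hxi]

lemma pvShape_eq (bs sY sX : List Int) (x y : Int) (i : Nat)
    (hi : i < bs.length * bs.length * sY.length * sX.length) :
    ∀ (h : i < (pvL bs sY sX x y).length),
      (pvL bs sY sX x y)[i] = pvShapeAt bs sY sX x y i := by
  intro h
  have := pvShape_get bs sY sX x y i hi
  rw [List.getElem?_eq_getElem h] at this
  exact Option.some.injEq _ _ ▸ (by simpa using this)

lemma pvA_core (bs sY sX : List Int) (x y : Int) :
    bs.foldl (fun acc W =>
      bs.foldl (fun acc Z =>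
        sY.foldl (fun acc height =>
          sX.foldl (fun acc width =>
            acc ++ [[W, Z, height * x, width * y]]) acc) acc) acc) ([] : List (List Int))
    = pvL bs sY sX x y := by
  simp only [PySem.List.foldl_append_singleton_eq_map, PySem.List.foldl_append_eq_flatMap]
  simp [pvL]

theorem generate_shard_input_shapes_spec : Claim_equal_generate_shard_input_shapes := by
  unfold Claim_equal_generate_shard_input_shapes
  intro bs sY sX x y _
  unfold Spec_generate_shard_input_shapes
  unfold generate_shard_input_shapes generate_shard_input_shapes_alt
  dsimp only
  rw [pvA_core]
  set n := bs.length * bs.length * sY.length * sX.length with hn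
  have hlen : (pvL bs sY sX x y).length = n := pvLen_pvL bs sY sX x y
  rw [PySem.List.slice_to _ (by norm_num), PySem.List.slice_from_neg_ofNat _ 50 (by norm_num)]
  rw [List.map_append]
  congr 1
  · -- take side
    apply List.ext_getElem
    · simp [hlen]
    · intro k h1 h2
      have hk : k < min 50 n := by simpa [hlen] using h1
      rw [List.getElem_take, List.getElem_map, List.getElem_range]
      exact pvShape_eq bs sY sX x y k (by omega) _
  · -- drop side
    apply List.ext_getElem
    · simp [hlen]
    · intro k h1 h2
      have hk : k < n - (n - 50) := by simpa [hlen] using h1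
      rw [List.getElem_drop, List.getElem_map, List.getElem_range']
      simp only [hlen]
      have := pvShape_eq bs sY sX x y (n - 50 + k) (by omega)
      rw [show n - 50 + 1 * k = n - 50 + k by omega]
      exact this _
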